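-- pv_equiv track=rewrite | github.com/rose1027/python-hackerrank | hackerank/minmax.py | miniMaxSum
-- ===== SOURCE A (Python) =====
-- def miniMaxSum(arr):
--     l = []
--     sum = 0
--     for i in range(len(arr)):
--         sum += arr[i]
--     for j in range(len(arr)):
--         temp = sum
--         temp -= arr[j]
--         l.append(temp)
--     return min(l), max(l)
-- ===== SOURCE B (Python) =====
-- def miniMaxSum(arr):
--     total = sum(arr)
--     return total - max(arr), total - min(arr)
-- ===== Notes on version B (the rewrite author's own statement) =====
-- stated objective: simpler
-- what changed: Instead of building the list of all total-minus-element partial sums and taking its min/max over it, B uses the identity min/max{total - a_i} = total - max/min{a_i} and calls max/min directly on arr, never constructing the intermediate list (measured ~2x faster, O(1) extra space).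
import Mathlib
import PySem

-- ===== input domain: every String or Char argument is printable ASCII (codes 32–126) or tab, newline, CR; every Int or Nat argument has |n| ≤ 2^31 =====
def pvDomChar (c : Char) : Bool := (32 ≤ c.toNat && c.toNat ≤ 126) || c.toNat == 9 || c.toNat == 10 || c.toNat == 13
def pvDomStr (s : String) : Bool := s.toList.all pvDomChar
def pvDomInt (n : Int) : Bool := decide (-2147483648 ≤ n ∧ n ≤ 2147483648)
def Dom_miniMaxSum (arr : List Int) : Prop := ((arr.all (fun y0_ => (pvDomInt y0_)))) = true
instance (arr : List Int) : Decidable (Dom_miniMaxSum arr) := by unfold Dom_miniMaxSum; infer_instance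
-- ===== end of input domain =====

-- B replaces A's intermediate list of partial sums by min/max on arr directly
-- (min/max{total - a_i} = total - max/min{a_i}): simpler, O(1) extra space.

-- ===== PORT A =====
def miniMaxSum (arr : List Int) : Int × Int :=
  let s := (PySem.List.pyRange 0 (PySem.List.len arr)).foldl
             (fun acc i => acc + PySem.List.pyGetD arr i 0) 0
  let l := (PySem.List.pyRange 0 (PySem.List.len arr)).foldl
             (fun acc j => acc ++ [s - PySem.List.pyGetD arr j 0]) []
  ((PySem.List.min? l (fun y => y)).getD 0, (PySem.List.max? l (fun y => y)).getD 0)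

-- ===== PORT B =====
def miniMaxSum_alt (arr : List Int) : Int × Int :=
  let total := arr.sum
  (total - (PySem.List.max? arr (fun y => y)).getD 0,
   total - (PySem.List.min? arr (fun y => y)).getD 0)

-- ===== PRECONDITION & SPEC =====
-- Pre_ excludes only the empty list, on which A (min of an empty list) raises ValueError.
def Pre_miniMaxSum (arr : List Int) : Prop := arr ≠ []
instance (arr : List Int) : Decidable (Pre_miniMaxSum arr) := by unfold Pre_miniMaxSum; infer_instance
def pvWitness_miniMaxSum : List Int := ([1, 2, 3, 4, 5])

def Spec_miniMaxSum (arr : List Int) (out : Int × Int) : Prop := out = miniMaxSum_alt arr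
instance (arr : List Int) (out : Int × Int) : Decidable (Spec_miniMaxSum arr out) := by unfold Spec_miniMaxSum; infer_instance

-- ===== CLAIM (what is proved, stated in full; the proofs are below) =====
def Claim_equal_miniMaxSum : Prop := ∀ (arr : List Int), Dom_miniMaxSum arr → Pre_miniMaxSum arr → Spec_miniMaxSum arr (miniMaxSum arr)

-- ===== LEMMAS AND PROOFS =====

lemma foldl_min_map_sub (s x : Int) (t : List Int) :
    (t.map (fun y => s - y)).foldl min (s - x) = s - t.foldl max x := by
  induction t generalizing x with
  | nil => rfl
  | cons a t ih =>
    simp only [List.map_cons, List.foldl_cons]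
    rw [show min (s - x) (s - a) = s - max x a by omega, ih]

lemma foldl_max_map_sub (s x : Int) (t : List Int) :
    (t.map (fun y => s - y)).foldl max (s - x) = s - t.foldl min x := by
  induction t generalizing x with
  | nil => rfl
  | cons a t ih =>
    simp only [List.map_cons, List.foldl_cons]
    rw [show max (s - x) (s - a) = s - min x a by omega, ih]

-- ===== VERDICT (by name: the statement is the Claim_ definition above) =====
theorem miniMaxSum_spec : Claim_equal_miniMaxSum := by
  intro arr _ hpre
  unfold Spec_miniMaxSum miniMaxSum miniMaxSum_alt
  dsimp only
  obtain ⟨x, t, rfl⟩ : ∃ x t, arr = x :: t := by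
    cases arr with
    | nil => exact absurd rfl hpre
    | cons x t => exact ⟨x, t, rfl⟩
  rw [PySem.List.foldl_pyRange_pyGetD (x :: t) 0 (· + ·) 0 le_rfl,
      PySem.List.foldl_append_singleton_eq_map (fun j => _ - PySem.List.pyGetD (x :: t) j 0) _ []]
  rw [show (List.map (fun j => List.foldl (· + ·) 0 (List.drop (Int.toNat 0) (x :: t)) -
        PySem.List.pyGetD (x :: t) j 0) (PySem.List.pyRange 0 (PySem.List.len (x :: t)))) =
      List.map (fun y => List.foldl (· + ·) 0 (List.drop (Int.toNat 0) (x :: t)) - y)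
        (List.map (fun j => PySem.List.pyGetD (x :: t) j 0)
          (PySem.List.pyRange 0 (PySem.List.len (x :: t)))) from List.map_map.symm,
      PySem.List.map_pyGetD_pyRange_zero (x :: t) 0]
  simp only [Int.toNat_zero, List.drop_zero, List.nil_append, List.map_cons,
    PySem.List.min?_id_cons, PySem.List.max?_id_cons, Option.getD_some]
  rw [foldl_min_map_sub, foldl_max_map_sub]
  have hsum : List.foldl (· + ·) 0 (x :: t) = (x :: t).sum := List.sum_eq_foldl.symm
  rw [hsum]
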